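-- pv_equiv track=rewrite | github.com/qiaowangli/ML4DB | src/data_processor.py | tokenization
-- ===== SOURCE A (Python) =====
-- def tokenization(sequence_list):
--     """
--     input : sequence_list -> [[s1],[s2],[s3],[s4] ....,[sn]] where sn is prediction vector
--     output: tokenized sequence_list -> [1,2,3,2,3,....,678] and a look_up table -> {[s1]:0,[s2]:1,[s3]:2,[s4]:3 ....,[sn]:n-1}
--     """
--     lookup_table={}
--     tokenized_sequence_list=[]
--     index=0
--     for predicton_vector in sequence_list:
--         if predicton_vector not in lookup_table.values():
--             lookup_table[index]=predicton_vector
--             tokenized_sequence_list.append(index)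
--             index+=1
--         else:
--             # each key must have a unique value
--             tokenized_sequence_list.append(list(lookup_table.keys())[list(lookup_table.values()).index(predicton_vector)])
--     return tokenized_sequence_list,lookup_table
-- ===== SOURCE B (Python) =====
-- def tokenization(sequence_list):
--     # pass 1: collect distinct vectors in first-appearance order
--     unique = []
--     for v in sequence_list:
--         if v not in unique:
--             unique.append(v)
--     # pass 2: table and tokens are derived separately from `unique`
--     lookup_table = {i: v for i, v in enumerate(unique)}
--     tokenized = [unique.index(v) for v in sequence_list]
--     return tokenized, lookup_table
-- ===== Notes on version B (the rewrite author's own statement) =====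
-- stated objective: simpler
-- what changed: A's single interleaved loop that grows the dict, counter and token list together is replaced by a collect-distinct pass followed by a separate enumerate-built table and a map of unique.index over the input.
import Mathlib
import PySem

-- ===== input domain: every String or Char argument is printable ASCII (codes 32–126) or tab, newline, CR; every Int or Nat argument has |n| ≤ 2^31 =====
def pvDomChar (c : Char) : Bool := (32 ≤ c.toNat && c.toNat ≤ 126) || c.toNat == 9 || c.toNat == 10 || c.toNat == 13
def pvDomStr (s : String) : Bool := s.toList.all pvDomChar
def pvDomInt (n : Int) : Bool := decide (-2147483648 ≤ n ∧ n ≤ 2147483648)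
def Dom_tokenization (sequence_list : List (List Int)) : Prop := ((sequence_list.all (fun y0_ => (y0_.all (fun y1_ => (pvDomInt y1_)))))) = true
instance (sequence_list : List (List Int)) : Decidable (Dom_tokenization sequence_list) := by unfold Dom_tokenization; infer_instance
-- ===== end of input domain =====

-- B replaces A's single interleaved build-and-tokenize loop by a collect-distinct pass
-- followed by a separately built enumerate table and an index-lookup map (simpler decomposition).


-- ===== PORT A =====
-- list(lookup_table.keys())[list(lookup_table.values()).index(v)]: the key of the first
-- pair whose value equals v (exact: dict keys/values enumerate the pairs in insertion order)
def pyLookup (table : List (Int × List Int)) (v : List Int) : Int :=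
  match table with
  | [] => 0
  | (k, w) :: rest => if w = v then k else pyLookup rest v

-- A's loop body over the state (lookup_table, tokenized_sequence_list, index)
def stepA (st : List (Int × List Int) × List Int × Int) (v : List Int) :
    List (Int × List Int) × List Int × Int :=
  if v ∉ st.1.map Prod.snd then
    (st.1 ++ [(st.2.2, v)], st.2.1 ++ [st.2.2], st.2.2 + 1)
  else
    (st.1, st.2.1 ++ [pyLookup st.1 v], st.2.2)

def tokenization (sequence_list : List (List Int)) : List Int × (List (Int × List Int)) :=
  let st := sequence_list.foldl stepA ([], [], 0)
  (st.2.1, st.1)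

-- ===== PORT B =====
def tokenization_alt (sequence_list : List (List Int)) : List Int × (List (Int × List Int)) :=
  let unique := sequence_list.foldl (fun u v => if v ∈ u then u else u ++ [v]) []
  let lookup_table := PySem.List.enumerate unique 0
  let tokenized := sequence_list.map (fun v =>
    match PySem.List.index? unique v with
    | some i => (i : Int)
    | none => 0)   -- unreachable: every v of sequence_list is in unique
  (tokenized, lookup_table)

-- ===== PRECONDITION & SPEC =====
def Spec_tokenization (sequence_list : List (List Int)) (out : List Int × (List (Int × List Int))) : Prop := out = tokenization_alt sequence_list
instance (sequence_list : List (List Int)) (out : List Int × (List (Int × List Int))) : Decidable (Spec_tokenization sequence_list out) := by unfold Spec_tokenization; infer_instance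

-- ===== CLAIM (what is proved, stated in full; the proofs are below) =====
def Claim_equal_tokenization : Prop := ∀ (sequence_list : List (List Int)), Dom_tokenization sequence_list → Spec_tokenization sequence_list (tokenization sequence_list)

-- ===== LEMMAS AND PROOFS =====

-- B's token function, as a named function for reasoning
def tokB (u : List (List Int)) (v : List Int) : Int :=
  match PySem.List.index? u v with
  | some i => (i : Int)
  | none => 0

-- B's unique-collection fold continued from an accumulator u
def uniqFrom (u : List (List Int)) (s : List (List Int)) : List (List Int) :=
  s.foldl (fun u v => if v ∈ u then u else u ++ [v]) u

theorem uniqFrom_nil (u : List (List Int)) : uniqFrom u [] = u := rfl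

theorem uniqFrom_cons (u : List (List Int)) (v : List Int) (s : List (List Int)) :
    uniqFrom u (v :: s) = uniqFrom (if v ∈ u then u else u ++ [v]) s := rfl

theorem uniqFrom_prefix (s u : List (List Int)) : ∃ w, uniqFrom u s = u ++ w := by
  induction s generalizing u with
  | nil => exact ⟨[], by simp [uniqFrom_nil]⟩
  | cons v r ih =>
    rw [uniqFrom_cons]
    by_cases hv : v ∈ u
    · simpa [hv] using ih u
    · obtain ⟨w, hw⟩ := ih (u ++ [v])
      exact ⟨[v] ++ w, by simp [hv, hw]⟩

theorem tokB_append_of_mem (u w : List (List Int)) (v : List Int) (h : v ∈ u) :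
    tokB (u ++ w) v = tokB u v := by
  unfold tokB
  rw [PySem.List.index?_append_of_mem w h]

theorem tokB_uniqFrom (s u : List (List Int)) (v : List Int) (h : v ∈ u) :
    tokB (uniqFrom u s) v = tokB u v := by
  obtain ⟨w, hw⟩ := uniqFrom_prefix s u
  rw [hw, tokB_append_of_mem u w v h]

theorem tokB_snoc_self (u : List (List Int)) (v : List Int) (h : v ∉ u) :
    tokB (u ++ [v]) v = (u.length : Int) := by
  unfold tokB
  rw [PySem.List.index?_append_singleton_self u v h]

theorem pyLookup_enumerate (u : List (List Int)) (k : Int) (v : List Int) (h : v ∈ u) :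
    pyLookup (PySem.List.enumerate u k) v = k + tokB u v := by
  induction u generalizing k with
  | nil => simp at h
  | cons x r ih =>
    rw [PySem.List.enumerate_cons]
    by_cases hx : x = v
    · subst hx
      unfold tokB
      rw [PySem.List.index?_cons_self]
      simp [pyLookup]
    · have hr : v ∈ r := by
        rcases List.mem_cons.mp h with h' | h'
        · exact absurd h'.symm hx
        · exact h'
      obtain ⟨i, hi⟩ : ∃ i, PySem.List.index? r v = some i := by
        cases hh : PySem.List.index? r v with
        | none => exact absurd ((PySem.List.index?_eq_none_iff r v).mp hh) (by simp [hr])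
        | some i => exact ⟨i, rfl⟩
      have h1 : pyLookup ((k, x) :: PySem.List.enumerate r (k + 1)) v
          = pyLookup (PySem.List.enumerate r (k + 1)) v := by
        simp [pyLookup, hx]
      rw [h1, ih (k + 1) hr]
      unfold tokB
      rw [PySem.List.index?_cons_of_ne r hx, hi]
      simp only [Option.map_some]
      push_cast
      ring

theorem loop_inv (s : List (List Int)) : ∀ (u : List (List Int)) (toks : List Int),
    s.foldl stepA (PySem.List.enumerate u 0, toks, (u.length : Int))
      = (PySem.List.enumerate (uniqFrom u s) 0,
         toks ++ s.map (tokB (uniqFrom u s)),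
         ((uniqFrom u s).length : Int)) := by
  induction s with
  | nil => intro u toks; simp [uniqFrom_nil]
  | cons v r ih =>
    intro u toks
    rw [List.foldl_cons]
    have hsnd : (PySem.List.enumerate u 0).map Prod.snd = u :=
      PySem.List.map_snd_enumerate u 0
    by_cases hv : v ∈ u
    · have hstep : stepA (PySem.List.enumerate u 0, toks, (u.length : Int)) v
          = (PySem.List.enumerate u 0, toks ++ [tokB u v], (u.length : Int)) := by
        simp [stepA, hsnd, hv, pyLookup_enumerate u 0 v hv]
      rw [hstep, ih u (toks ++ [tokB u v])]
      rw [uniqFrom_cons, if_pos hv]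
      simp [tokB_uniqFrom r u v hv]
    · have hstep : stepA (PySem.List.enumerate u 0, toks, (u.length : Int)) v
          = (PySem.List.enumerate (u ++ [v]) 0, toks ++ [(u.length : Int)],
             ((u ++ [v]).length : Int)) := by
        simp [stepA, hsnd, hv, PySem.List.enumerate_append]
      rw [hstep, ih (u ++ [v]) (toks ++ [(u.length : Int)])]
      rw [uniqFrom_cons, if_neg hv]
      have htok : tokB (uniqFrom (u ++ [v]) r) v = (u.length : Int) := by
        rw [tokB_uniqFrom r (u ++ [v]) v (by simp), tokB_snoc_self u v hv]
      simp [htok]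

-- ===== VERDICT (by name: the statement is the Claim_ definition above) =====
theorem tokenization_spec : Claim_equal_tokenization := by
  intro s _
  show tokenization s = tokenization_alt s
  unfold tokenization tokenization_alt
  have h := loop_inv s [] []
  simp only [PySem.List.enumerate_nil, List.length_nil, Nat.cast_zero, List.nil_append] at h
  rw [h]
  simp [tokB, uniqFrom]
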